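-- pv_equiv track=rewrite | github.com/nitishkumarnitc/sakila-code-analyzer | src/analyser.py | priority_key
-- ===== SOURCE A (Python) =====
-- from typing import List, Dict, Optional, Any
--
-- def priority_key(m: Dict[str, Any]) -> tuple:
--     p = (m.get("path") or "").lower()
--     if any(x in p for x in ["controller", "controllers"]):
--         return (0, p)
--     if any(x in p for x in ["service", "services", "serviceimpl"]):
--         return (1, p)
--     if any(x in p for x in ["repository", "repositories", "respository", "repo", "/dao/"]):
--         return (2, p)
--     if any(x in p for x in ["entity", "entities", "model", "models", "domain", "pojo"]):
--         return (3, p)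
--     if any(x in p for x in ["security", "securingweb", "auth", "config"]):
--         return (4, p)
--     return (5, p)
-- ===== SOURCE B (Python) =====
-- # Minimum-tier formulation: instead of an ordered early-return cascade over keyword
-- # groups, scan a flat keyword->tier map (listed alphabetically; order is irrelevant)
-- # and keep the smallest matching tier.  Equivalent because the cascade's groups carry
-- # strictly increasing tiers, so the first matching group is the minimum matching tier.
-- TIERS = {
--     "/dao/": 2, "auth": 4, "config": 4, "controller": 0, "controllers": 0,
--     "domain": 3, "entities": 3, "entity": 3, "model": 3, "models": 3,
--     "pojo": 3, "repo": 2, "repositories": 2, "repository": 2, "respository": 2,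
--     "securingweb": 4, "security": 4, "service": 1, "serviceimpl": 1, "services": 1,
-- }
--
-- def priority_key(m):
--     p = (m.get("path") or "").lower()
--     best = 5
--     for k, t in TIERS.items():
--         if k in p and t < best:
--             best = t
--     return (best, p)
-- ===== Notes on version B (the rewrite author's own statement) =====
-- stated objective: alternative
-- what changed: Replaces the ordered five-group early-return cascade with a single pass over a flat keyword->tier map (listed alphabetically, order irrelevant) that keeps the minimum matching tier, defaulting to 5; correct because the cascade's group tiers strictly increase, so first match = minimum match.
import Mathlib
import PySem

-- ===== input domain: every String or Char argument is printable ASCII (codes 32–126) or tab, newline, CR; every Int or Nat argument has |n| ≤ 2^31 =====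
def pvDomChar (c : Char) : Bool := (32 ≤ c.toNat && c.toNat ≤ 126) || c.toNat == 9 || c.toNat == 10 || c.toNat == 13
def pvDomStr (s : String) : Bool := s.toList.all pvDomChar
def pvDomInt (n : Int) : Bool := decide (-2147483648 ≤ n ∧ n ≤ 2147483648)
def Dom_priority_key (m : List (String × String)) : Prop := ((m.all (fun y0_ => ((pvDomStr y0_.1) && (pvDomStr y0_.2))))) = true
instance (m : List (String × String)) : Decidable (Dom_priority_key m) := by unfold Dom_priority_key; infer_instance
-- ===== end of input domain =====

-- B replaces A's ordered early-return group cascade by a single minimum-tier pass over a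
-- flat keyword->tier map (order-independent); equal because group tiers strictly increase
-- (objective: alternative).

-- ===== PORT A =====
-- (m.get("path") or "") is exact as getD "": the only falsy str is "", and "" or "" = "".
def priority_key (m : List (String × String)) : Int × String :=
  let p := PySem.Str.lower (((PySem.Dict.mk m).get? "path").getD "")
  if ["controller", "controllers"].any (fun x => PySem.Str.isIn x p) then (0, p)
  else if ["service", "services", "serviceimpl"].any (fun x => PySem.Str.isIn x p) then (1, p)
  else if ["repository", "repositories", "respository", "repo", "/dao/"].any (fun x => PySem.Str.isIn x p) then (2, p)
  else if ["entity", "entities", "model", "models", "domain", "pojo"].any (fun x => PySem.Str.isIn x p) then (3, p)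
  else if ["security", "securingweb", "auth", "config"].any (fun x => PySem.Str.isIn x p) then (4, p)
  else (5, p)

-- ===== PORT B =====
def pkTiers : List (String × Int) :=
  [("/dao/", 2), ("auth", 4), ("config", 4), ("controller", 0), ("controllers", 0),
   ("domain", 3), ("entities", 3), ("entity", 3), ("model", 3), ("models", 3),
   ("pojo", 3), ("repo", 2), ("repositories", 2), ("repository", 2), ("respository", 2),
   ("securingweb", 4), ("security", 4), ("service", 1), ("serviceimpl", 1), ("services", 1)]

def priority_key_alt (m : List (String × String)) : Int × String :=
  let p := PySem.Str.lower (((PySem.Dict.mk m).get? "path").getD "")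
  let best := pkTiers.foldl (fun best kt => if PySem.Str.isIn kt.1 p ∧ kt.2 < best then kt.2 else best) 5
  (best, p)

-- ===== PRECONDITION & SPEC =====
def Spec_priority_key (m : List (String × String)) (out : Int × String) : Prop := out = priority_key_alt m
instance (m : List (String × String)) (out : Int × String) : Decidable (Spec_priority_key m out) := by unfold Spec_priority_key; infer_instance

-- ===== CLAIM (what is proved, stated in full; the proofs are below) =====
def Claim_equal_priority_key : Prop := ∀ (m : List (String × String)), Dom_priority_key m → Spec_priority_key m (priority_key m)

-- ===== LEMMAS AND PROOFS =====

theorem pk_fold_le_init (p : String) (a : Int) (l : List (String × Int)) :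
    l.foldl (fun best kt => if PySem.Str.isIn kt.1 p ∧ kt.2 < best then kt.2 else best) a ≤ a := by
  induction l generalizing a with
  | nil => simp
  | cons kt l ih =>
    simp only [List.foldl_cons]
    split_ifs with h
    · exact le_trans (ih kt.2) (le_of_lt h.2)
    · exact ih a

theorem pk_fold_le_mem (p k : String) (t : Int) (hin : PySem.Str.isIn k p = true) :
    ∀ (l : List (String × Int)) (a : Int), (k, t) ∈ l →
    l.foldl (fun best kt => if PySem.Str.isIn kt.1 p ∧ kt.2 < best then kt.2 else best) a ≤ t := by
  intro l
  induction l with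
  | nil => intro a hm; simp at hm
  | cons kt l ih =>
    intro a hm
    simp only [List.foldl_cons]
    rcases List.mem_cons.mp hm with h | h
    · subst h
      simp only
      split_ifs with hc
      · exact pk_fold_le_init p t l
      · have : ¬ t < a := fun hl => hc ⟨hin, hl⟩
        exact le_trans (pk_fold_le_init p a l) (not_lt.mp this)
    · exact ih _ h

theorem pk_le_fold (p : String) (b : Int) :
    ∀ (l : List (String × Int)) (a : Int), b ≤ a →
    (∀ k t, (k, t) ∈ l → PySem.Str.isIn k p = true → b ≤ t) →
    b ≤ l.foldl (fun best kt => if PySem.Str.isIn kt.1 p ∧ kt.2 < best then kt.2 else best) a := by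
  intro l
  induction l with
  | nil => intro a ha _; simpa
  | cons kt l ih =>
    intro a ha h
    simp only [List.foldl_cons]
    refine ih _ ?_ (fun k t hm hin => h k t (List.mem_cons_of_mem _ hm) hin)
    split_ifs with hc
    · exact h kt.1 kt.2 (List.mem_cons_self) hc.1
    · exact ha

-- the core: A's cascade equals B's minimum fold, for every path string
theorem pk_chain_eq_fold (p : String) :
    (if ["controller", "controllers"].any (fun x => PySem.Str.isIn x p) then (0 : Int)
     else if ["service", "services", "serviceimpl"].any (fun x => PySem.Str.isIn x p) then 1
     else if ["repository", "repositories", "respository", "repo", "/dao/"].any (fun x => PySem.Str.isIn x p) then 2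
     else if ["entity", "entities", "model", "models", "domain", "pojo"].any (fun x => PySem.Str.isIn x p) then 3
     else if ["security", "securingweb", "auth", "config"].any (fun x => PySem.Str.isIn x p) then 4
     else 5)
    = pkTiers.foldl (fun best kt => if PySem.Str.isIn kt.1 p ∧ kt.2 < best then kt.2 else best) 5 := by
  by_cases h0 : ["controller", "controllers"].any (fun x => PySem.Str.isIn x p) = true
  case pos =>
    rw [if_pos h0]
    refine le_antisymm ?_ ?_
    · refine pk_le_fold p 0 pkTiers 5 (by norm_num) ?_
      intro k t hm _; fin_cases hm <;> norm_num
    · simp only [List.any_cons, List.any_nil, Bool.or_eq_true] at h0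
      rcases h0 with h | h | h
      · exact pk_fold_le_mem p _ 0 h pkTiers 5 (by simp [pkTiers])
      · exact pk_fold_le_mem p _ 0 h pkTiers 5 (by simp [pkTiers])
      · simp at h
  case neg =>
  rw [if_neg h0]
  by_cases h1 : ["service", "services", "serviceimpl"].any (fun x => PySem.Str.isIn x p) = true
  case pos =>
    rw [if_pos h1]
    refine le_antisymm ?_ ?_
    · refine pk_le_fold p 1 pkTiers 5 (by norm_num) ?_
      intro k t hm hin; fin_cases hm <;> simp_all
    · simp only [List.any_cons, List.any_nil, Bool.or_eq_true] at h1
      rcases h1 with h | h | h | h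
      · exact pk_fold_le_mem p _ 1 h pkTiers 5 (by simp [pkTiers])
      · exact pk_fold_le_mem p _ 1 h pkTiers 5 (by simp [pkTiers])
      · exact pk_fold_le_mem p _ 1 h pkTiers 5 (by simp [pkTiers])
      · simp at h
  case neg =>
  rw [if_neg h1]
  by_cases h2 : ["repository", "repositories", "respository", "repo", "/dao/"].any (fun x => PySem.Str.isIn x p) = true
  case pos =>
    rw [if_pos h2]
    refine le_antisymm ?_ ?_
    · refine pk_le_fold p 2 pkTiers 5 (by norm_num) ?_
      intro k t hm hin; fin_cases hm <;> simp_all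
    · simp only [List.any_cons, List.any_nil, Bool.or_eq_true] at h2
      rcases h2 with h | h | h | h | h | h
      · exact pk_fold_le_mem p _ 2 h pkTiers 5 (by simp [pkTiers])
      · exact pk_fold_le_mem p _ 2 h pkTiers 5 (by simp [pkTiers])
      · exact pk_fold_le_mem p _ 2 h pkTiers 5 (by simp [pkTiers])
      · exact pk_fold_le_mem p _ 2 h pkTiers 5 (by simp [pkTiers])
      · exact pk_fold_le_mem p _ 2 h pkTiers 5 (by simp [pkTiers])
      · simp at h
  case neg =>
  rw [if_neg h2]
  by_cases h3 : ["entity", "entities", "model", "models", "domain", "pojo"].any (fun x => PySem.Str.isIn x p) = true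
  case pos =>
    rw [if_pos h3]
    refine le_antisymm ?_ ?_
    · refine pk_le_fold p 3 pkTiers 5 (by norm_num) ?_
      intro k t hm hin; fin_cases hm <;> simp_all
    · simp only [List.any_cons, List.any_nil, Bool.or_eq_true] at h3
      rcases h3 with h | h | h | h | h | h | h
      · exact pk_fold_le_mem p _ 3 h pkTiers 5 (by simp [pkTiers])
      · exact pk_fold_le_mem p _ 3 h pkTiers 5 (by simp [pkTiers])
      · exact pk_fold_le_mem p _ 3 h pkTiers 5 (by simp [pkTiers])
      · exact pk_fold_le_mem p _ 3 h pkTiers 5 (by simp [pkTiers])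
      · exact pk_fold_le_mem p _ 3 h pkTiers 5 (by simp [pkTiers])
      · exact pk_fold_le_mem p _ 3 h pkTiers 5 (by simp [pkTiers])
      · simp at h
  case neg =>
  rw [if_neg h3]
  by_cases h4 : ["security", "securingweb", "auth", "config"].any (fun x => PySem.Str.isIn x p) = true
  case pos =>
    rw [if_pos h4]
    refine le_antisymm ?_ ?_
    · refine pk_le_fold p 4 pkTiers 5 (by norm_num) ?_
      intro k t hm hin; fin_cases hm <;> simp_all
    · simp only [List.any_cons, List.any_nil, Bool.or_eq_true] at h4
      rcases h4 with h | h | h | h | h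
      · exact pk_fold_le_mem p _ 4 h pkTiers 5 (by simp [pkTiers])
      · exact pk_fold_le_mem p _ 4 h pkTiers 5 (by simp [pkTiers])
      · exact pk_fold_le_mem p _ 4 h pkTiers 5 (by simp [pkTiers])
      · exact pk_fold_le_mem p _ 4 h pkTiers 5 (by simp [pkTiers])
      · simp at h
  case neg =>
  rw [if_neg h4]
  refine le_antisymm ?_ (pk_fold_le_init p 5 pkTiers)
  refine pk_le_fold p 5 pkTiers 5 (by norm_num) ?_
  intro k t hm hin; fin_cases hm <;> simp_all

-- the cascade lifted to pairs
theorem pk_pair (p : String) :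
    (if ["controller", "controllers"].any (fun x => PySem.Str.isIn x p) then ((0 : Int), p)
     else if ["service", "services", "serviceimpl"].any (fun x => PySem.Str.isIn x p) then (1, p)
     else if ["repository", "repositories", "respository", "repo", "/dao/"].any (fun x => PySem.Str.isIn x p) then (2, p)
     else if ["entity", "entities", "model", "models", "domain", "pojo"].any (fun x => PySem.Str.isIn x p) then (3, p)
     else if ["security", "securingweb", "auth", "config"].any (fun x => PySem.Str.isIn x p) then (4, p)
     else (5, p))
    = (pkTiers.foldl (fun best kt => if PySem.Str.isIn kt.1 p ∧ kt.2 < best then kt.2 else best) 5, p) := by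
  have h := pk_chain_eq_fold p
  split_ifs at h ⊢ <;> exact Prod.ext h rfl

-- ===== VERDICT (by name: the statement is the Claim_ definition above) =====
theorem priority_key_spec : Claim_equal_priority_key := by
  intro m _
  unfold Spec_priority_key priority_key priority_key_alt
  exact pk_pair (PySem.Str.lower (((PySem.Dict.mk m).get? "path").getD ""))
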